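-- pv_equiv track=rewrite | github.com/JesseCorrington/CryptoHypeTrader | ingestion/tasks.py | __duplicate_symbols
-- ===== SOURCE A (Python) =====
-- def __duplicate_symbols(coins):
--     """Returns a list of symbols that have duplicates in the coin list"""
--
--     symbols = set()
--     duplicate_symbols = set()
--     for coin in coins:
--         sym = coin["symbol"]
--         if sym in symbols:
--             duplicate_symbols.add(sym)
--         else:
--             symbols.add(sym)
--
--     return duplicate_symbols
-- ===== SOURCE B (Python) =====
-- def __duplicate_symbols(coins):
--     """Returns a list of symbols that have duplicates in the coin list"""
--     syms = [coin["symbol"] for coin in coins]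
--     first = {}
--     for i, s in enumerate(syms):
--         first.setdefault(s, i)
--     return {s for i, s in enumerate(syms) if first[s] != i}
-- ===== Notes on version B (the rewrite author's own statement) =====
-- stated objective: alternative
-- what changed: Replaces A's two-set seen/duplicate membership bookkeeping with a staged index-map approach: one pass records each symbol's first-occurrence index in a dict via setdefault, then a comprehension selects every occurrence whose index differs from its symbol's first index.
import Mathlib
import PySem

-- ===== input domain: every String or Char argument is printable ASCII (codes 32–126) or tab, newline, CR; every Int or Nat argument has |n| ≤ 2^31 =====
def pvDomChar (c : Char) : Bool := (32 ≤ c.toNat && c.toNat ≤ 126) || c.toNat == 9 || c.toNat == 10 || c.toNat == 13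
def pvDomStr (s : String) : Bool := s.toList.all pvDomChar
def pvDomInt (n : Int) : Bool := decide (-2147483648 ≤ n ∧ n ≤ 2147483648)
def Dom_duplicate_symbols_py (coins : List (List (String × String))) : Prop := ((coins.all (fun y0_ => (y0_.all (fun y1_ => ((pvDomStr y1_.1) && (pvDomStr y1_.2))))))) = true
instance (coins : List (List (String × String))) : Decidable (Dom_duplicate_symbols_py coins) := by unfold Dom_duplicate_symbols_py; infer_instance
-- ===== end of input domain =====

-- B is an alternative decomposition: a first-occurrence index map built with setdefault, then a
-- comprehension keeping every occurrence whose index differs from its symbol's first index,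
-- instead of A's single-pass two-set (seen/duplicate) bookkeeping.

-- coin["symbol"]; total form of the dict lookup, exact under Pre_ (which excludes the KeyError inputs)
def pvSym (coin : List (String × String)) : String :=
  ((PySem.Dict.mk coin).get? "symbol").getD ""

-- ===== PORT A =====
def dupLoopA : List (List (String × String)) → PySem.Set String → PySem.Set String → PySem.Set String
  | [], _, dups => dups
  | coin :: rest, symbols, dups =>
    let sym := pvSym coin
    if PySem.Set.contains symbols sym then dupLoopA rest symbols (PySem.Set.add dups sym)
    else dupLoopA rest (PySem.Set.add symbols sym) dups

def duplicate_symbols_py (coins : List (List (String × String))) : List String :=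
  dupLoopA coins PySem.Set.empty PySem.Set.empty

-- ===== PORT B =====
-- the 'for i, s in enumerate(syms): first.setdefault(s, i)' loop
def pvBuildFirst (syms : List String) : PySem.Dict String Int :=
  (PySem.List.enumerate syms 0).foldl (fun d p => d.setdefault p.2 p.1) PySem.Dict.empty

def duplicate_symbols_py_alt (coins : List (List (String × String))) : List String :=
  let syms := coins.map (fun coin => pvSym coin)
  let first := pvBuildFirst syms
  -- first[s]: the key is always present (it was inserted in the setdefault pass), so the
  -- total lookup 'getD … 0' is exact here
  (PySem.List.enumerate syms 0).foldl
    (fun acc p => if first.getD p.2 0 ≠ p.1 then PySem.Set.add acc p.2 else acc)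
    PySem.Set.empty

-- ===== PRECONDITION & SPEC =====
-- Pre_ excludes exactly the coins lacking a "symbol" key, on which the Python A raises KeyError.
def Pre_duplicate_symbols_py (coins : List (List (String × String))) : Prop :=
  (coins.all (fun coin => ((PySem.Dict.mk coin).get? "symbol").isSome)) = true
instance (coins : List (List (String × String))) : Decidable (Pre_duplicate_symbols_py coins) := by
  unfold Pre_duplicate_symbols_py; infer_instance

def pvWitness_duplicate_symbols_py : (List (List (String × String))) :=
  [[("symbol", "BTC")], [("symbol", "ETH")], [("symbol", "BTC")]]

def Spec_duplicate_symbols_py (coins : List (List (String × String))) (out : List String) : Prop := out = duplicate_symbols_py_alt coins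
instance (coins : List (List (String × String))) (out : List String) : Decidable (Spec_duplicate_symbols_py coins out) := by unfold Spec_duplicate_symbols_py; infer_instance

-- ===== CLAIM (what is proved, stated in full; the proofs are below) =====
def Claim_equal_duplicate_symbols_py : Prop := ∀ (coins : List (List (String × String))), Dom_duplicate_symbols_py coins → Pre_duplicate_symbols_py coins → Spec_duplicate_symbols_py coins (duplicate_symbols_py coins)

-- ===== LEMMAS AND PROOFS =====

-- A's loop lifted to the list of symbols
def loopS : List String → PySem.Set String → PySem.Set String → PySem.Set String
  | [], _, dups => dups
  | s :: rest, symbols, dups =>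
    if PySem.Set.contains symbols s then loopS rest symbols (PySem.Set.add dups s)
    else loopS rest (PySem.Set.add symbols s) dups

lemma dupLoopA_eq_loopS (coins : List (List (String × String)))
    (S D : PySem.Set String) :
    dupLoopA coins S D = loopS (coins.map pvSym) S D := by
  induction coins generalizing S D with
  | nil => rfl
  | cons c rest ih =>
    simp only [dupLoopA, loopS, List.map]
    split_ifs <;> exact ih _ _

-- the setdefault pass records, for each symbol present, the index of its FIRST occurrence
lemma buildFirst_get? (s : String) :
    ∀ (l : List String) (k : Int) (d : PySem.Dict String Int),
      ((PySem.List.enumerate l k).foldl (fun d p => d.setdefault p.2 p.1) d).get? s =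
        (match d.get? s with
         | some v => some v
         | none => if s ∈ l then some (k + (l.idxOf s : Int)) else none) := by
  intro l
  induction l with
  | nil => intro k d; cases h : d.get? s <;> simp [PySem.List.enumerate_nil, h]
  | cons x t ih =>
    intro k d
    rw [PySem.List.enumerate_cons, List.foldl_cons, ih]
    by_cases hds : (d.get? s).isSome
    · obtain ⟨v, hv⟩ := Option.isSome_iff_exists.mp hds
      have hset : (d.setdefault x k).get? s = some v := by
        by_cases hsx : s = x
        · subst hsx
          rw [PySem.Dict.get?_setdefault_self, hv]; rfl
        · rw [PySem.Dict.get?_setdefault_of_ne d k hsx, hv]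
      rw [hset, hv]
    · have hnone : d.get? s = none := Option.not_isSome_iff_eq_none.mp hds
      by_cases hsx : s = x
      · subst hsx
        have hset : (d.setdefault s k).get? s = some k := by
          rw [PySem.Dict.get?_setdefault_self, hnone]; rfl
        rw [hset, hnone]
        rw [if_pos (List.mem_cons_self)]
        rw [List.idxOf_cons_self]
        norm_num
      · have hset : (d.setdefault x k).get? s = none := by
          rw [PySem.Dict.get?_setdefault_of_ne d k hsx, hnone]
        rw [hset, hnone]
        simp only [List.mem_cons, hsx, false_or]
        by_cases hmem : s ∈ t
        · have hbe : (x == s) = false := beq_eq_false_iff_ne.mpr (Ne.symm hsx)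
          have hidx : (x :: t).idxOf s = t.idxOf s + 1 := by
            rw [List.idxOf_cons, hbe]
            rfl
          rw [if_pos hmem, if_pos hmem, hidx]
          push_cast
          ring_nf
        · rw [if_neg hmem, if_neg hmem]

lemma buildFirst_getD (syms : List String) (s : String) (hs : s ∈ syms) :
    (pvBuildFirst syms).getD s 0 = (syms.idxOf s : Int) := by
  rw [PySem.Dict.getD_eq_get?_getD]
  unfold pvBuildFirst
  rw [buildFirst_get? s syms 0 PySem.Dict.empty]
  simp [PySem.Dict.empty, PySem.Dict.get?, hs]

-- main invariant: A's loop over the suffix equals B's filtering fold over the same suffix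
lemma loopS_eq_fold (full : List String) :
    ∀ (rest pre : List String) (S D : PySem.Set String),
      full = pre ++ rest →
      (∀ x, PySem.Set.contains S x = true ↔ x ∈ pre) →
      loopS rest S D =
        (PySem.List.enumerate rest (pre.length : Int)).foldl
          (fun acc p =>
            if (pvBuildFirst full).getD p.2 0 ≠ p.1 then PySem.Set.add acc p.2 else acc)
          D := by
  intro rest
  induction rest with
  | nil => intro pre S D _ _; rfl
  | cons s rest ih =>
    intro pre S D hfull hS
    have hmemfull : s ∈ full := by rw [hfull]; simp
    have hidx := buildFirst_getD full s hmemfull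
    have hcond : ((pvBuildFirst full).getD s 0 ≠ ((pre.length : Nat) : Int)) ↔ s ∈ pre := by
      rw [hidx]
      constructor
      · intro hne
        by_contra hnm
        have heq : full.idxOf s = pre.length := by
          rw [hfull, List.idxOf_append, if_neg hnm, List.idxOf_cons_self]
          omega
        exact hne (by exact_mod_cast heq)
      · intro hm
        have heq : full.idxOf s = pre.idxOf s := by
          rw [hfull]; exact List.idxOf_append_of_mem hm
        have hlt : pre.idxOf s < pre.length := List.idxOf_lt_length_of_mem hm
        rw [heq]
        intro habs
        have : pre.idxOf s = pre.length := by exact_mod_cast habs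
        omega
    have hlen : ((pre.length : Int) + 1) = (((pre ++ [s]).length : Nat) : Int) := by simp
    rw [PySem.List.enumerate_cons, List.foldl_cons]
    by_cases hc : PySem.Set.contains S s = true
    · have hmem : s ∈ pre := (hS s).mp hc
      rw [loopS, if_pos hc, if_pos (hcond.mpr hmem), hlen]
      refine ih (pre ++ [s]) S (PySem.Set.add D s) (by simp [hfull]) ?_
      intro x
      rw [hS x]
      constructor
      · intro h; exact List.mem_append_left _ h
      · intro h
        rcases List.mem_append.mp h with h | h
        · exact h
        · simp at h; subst h; exact hmem
    · have hmem : s ∉ pre := fun h => hc ((hS s).mpr h)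
      rw [loopS, if_neg hc, if_neg (fun h => hmem (hcond.mp h)), hlen]
      refine ih (pre ++ [s]) (PySem.Set.add S s) D (by simp [hfull]) ?_
      intro x
      rw [PySem.Set.contains_iff, PySem.Set.mem_add, ← PySem.Set.contains_iff, hS x]
      simp [or_comm]

-- ===== VERDICT (by name: the statement is the Claim_ definition above) =====
theorem duplicate_symbols_py_spec : Claim_equal_duplicate_symbols_py := by
  intro coins _ _
  unfold Spec_duplicate_symbols_py duplicate_symbols_py duplicate_symbols_py_alt
  rw [dupLoopA_eq_loopS]
  have h := loopS_eq_fold (coins.map pvSym) (coins.map pvSym) []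
      PySem.Set.empty PySem.Set.empty (by simp) (by intro x; simp [PySem.Set.empty])
  simpa using h
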